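-- pv_equiv track=rewrite | github.com/hsedgfjasdbhabsdc/EntroCoT | method_code/core.py | _pick_most_spread
-- ===== SOURCE A (Python) =====
-- from typing import List, Dict, Tuple, Optional
--
-- def _pick_most_spread(idx_list: List[int], k: int) -> List[int]:
--     if k <= 0:
--         return []
--     if len(idx_list) <= k:
--         return idx_list[:]
--     idx_list = sorted(idx_list)
--     picked = {0, len(idx_list) - 1}
--     while len(picked) < k:
--         best_gap, best_i = -1, -1
--         for i in range(1, len(idx_list)):
--             if i in picked or i - 1 in picked:
--                 continue
--             gap = idx_list[i] - idx_list[i - 1]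
--             if gap > best_gap:
--                 best_gap, best_i = gap, i
--         if best_i == -1:
--             break
--         picked.add(best_i)
--     return [idx_list[i] for i in sorted(picked)]
-- ===== SOURCE B (Python) =====
-- def _pick_most_spread(idx_list, k):
--     if k <= 0:
--         return []
--     n = len(idx_list)
--     if n <= k:
--         return idx_list[:]
--     xs = sorted(idx_list)
--     # candidates 2..n-2 sorted by (gap descending, index ascending); one pass replaces A's repeated argmax scan
--     order = sorted(range(2, n - 1), key=lambda i: (xs[i - 1] - xs[i], i))
--     picked = {0, n - 1}
--     for i in order:
--         if len(picked) >= k: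
--             break
--         if i not in picked and i - 1 not in picked:
--             picked.add(i)
--     return [xs[i] for i in sorted(picked)]
-- ===== Notes on version B (the rewrite author's own statement) =====
-- stated objective: faster
-- what changed: A repeatedly rescans all adjacent gaps to find the next argmax (one full scan per picked index); B sorts the interior gap positions once by (gap descending, index ascending) and makes a single greedy pass over that order, relying on the fact that picking an index only ever invalidates candidates, never revalidates them.
import Mathlib
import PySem

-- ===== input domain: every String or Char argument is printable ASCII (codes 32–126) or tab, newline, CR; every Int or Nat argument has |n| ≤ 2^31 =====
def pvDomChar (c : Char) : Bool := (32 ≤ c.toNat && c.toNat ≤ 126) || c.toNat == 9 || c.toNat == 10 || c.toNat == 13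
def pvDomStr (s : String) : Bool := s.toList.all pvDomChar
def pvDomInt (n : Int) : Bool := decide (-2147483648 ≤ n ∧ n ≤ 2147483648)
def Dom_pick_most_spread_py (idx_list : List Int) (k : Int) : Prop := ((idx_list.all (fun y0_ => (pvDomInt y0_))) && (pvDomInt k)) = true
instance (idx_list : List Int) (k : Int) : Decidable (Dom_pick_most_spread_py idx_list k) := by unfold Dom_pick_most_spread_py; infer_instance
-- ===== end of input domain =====

-- B replaces A's repeated full argmax rescans by ONE sort of the interior gap positions
-- (gap descending, index ascending) followed by a single greedy pass; objective: faster.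

-- ===== PORT A =====
-- body of A's inner `for i in range(1, len(idx_list))` argmax scan
def pickA_step (xs : List Int) (picked : PySem.Set Int) (st : Int × Int) (i : Int) : Int × Int :=
  if picked.contains i || picked.contains (i - 1) then st
  else
    let gap := PySem.List.pyGetD xs i 0 - PySem.List.pyGetD xs (i - 1) 0
    if gap > st.1 then (gap, i) else st

def pickA_scan (xs : List Int) (picked : PySem.Set Int) : Int × Int :=
  (PySem.List.pyRange 1 (xs.length : Int) 1).foldl (pickA_step xs picked) (-1, -1)

-- the `while len(picked) < k` loop; fuel k.natAbs suffices: each pass adds a fresh index or breaks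
def pickA_loop (xs : List Int) (k : Int) : Nat → PySem.Set Int → PySem.Set Int
  | 0, picked => picked
  | fuel + 1, picked =>
    if ((picked : List Int).length : Int) < k then
      let bi := (pickA_scan xs picked).2
      if bi = -1 then picked else pickA_loop xs k fuel (picked.add bi)
    else picked

def pick_most_spread_py (idx_list : List Int) (k : Int) : List Int :=
  if k ≤ 0 then []
  else if (idx_list.length : Int) ≤ k then idx_list
  else
    let xs := PySem.List.sorted idx_list (fun x => x)
    let picked := pickA_loop xs k k.natAbs (PySem.Set.ofList [0, (xs.length : Int) - 1])
    (PySem.List.sorted picked (fun i => i)).map (fun i => PySem.List.pyGetD xs i 0)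

-- ===== PORT B =====
-- body of B's single greedy pass over the pre-sorted candidate list (`break` = skip once full)
def pickB_step (k : Int) (p : PySem.Set Int) (i : Int) : PySem.Set Int :=
  if k ≤ ((p : List Int).length : Int) then p
  else if !(p.contains i) && !(p.contains (i - 1)) then p.add i else p

def pickB_fold (k : Int) (order : List Int) (p : PySem.Set Int) : PySem.Set Int :=
  order.foldl (pickB_step k) p

def pick_most_spread_py_alt (idx_list : List Int) (k : Int) : List Int :=
  if k ≤ 0 then []
  else
    let n := idx_list.length
    if (n : Int) ≤ k then idx_list
    else
      let xs := PySem.List.sorted idx_list (fun x => x)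
      -- sorted(range(2, n-1), key=lambda i: (xs[i-1]-xs[i], i)); Python tuple order = Lex
      let order := PySem.List.sorted (PySem.List.pyRange 2 ((n : Int) - 1) 1)
        (fun i => toLex (PySem.List.pyGetD xs (i - 1) 0 - PySem.List.pyGetD xs i 0, i))
      let picked := pickB_fold k order (PySem.Set.ofList [0, (n : Int) - 1])
      (PySem.List.sorted picked (fun i => i)).map (fun i => PySem.List.pyGetD xs i 0)

-- ===== PRECONDITION & SPEC =====
def Spec_pick_most_spread_py (idx_list : List Int) (k : Int) (out : List Int) : Prop := out = pick_most_spread_py_alt idx_list k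
instance (idx_list : List Int) (k : Int) (out : List Int) : Decidable (Spec_pick_most_spread_py idx_list k out) := by unfold Spec_pick_most_spread_py; infer_instance

-- ===== CLAIM (what is proved, stated in full; the proofs are below) =====
def Claim_equal_pick_most_spread_py : Prop := ∀ (idx_list : List Int) (k : Int), Dom_pick_most_spread_py idx_list k → Spec_pick_most_spread_py idx_list k (pick_most_spread_py idx_list k)

-- ===== LEMMAS AND PROOFS =====

-- proof-only abbreviations: the gap at position i, validity of a candidate, A's preference order
def pvGap (xs : List Int) (i : Int) : Int :=
  PySem.List.pyGetD xs i 0 - PySem.List.pyGetD xs (i - 1) 0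

def pvValid (p : PySem.Set Int) (i : Int) : Prop := i ∉ (p : List Int) ∧ (i - 1) ∉ (p : List Int)

def pvKeyRel (xs : List Int) (a b : Int) : Prop :=
  pvGap xs b < pvGap xs a ∨ (pvGap xs a = pvGap xs b ∧ a < b)

lemma pv_step_invalid (xs : List Int) (p : PySem.Set Int) (st : Int × Int) (i : Int)
    (h : ¬ pvValid p i) : pickA_step xs p st i = st := by
  unfold pickA_step
  rw [if_pos]
  rcases not_and_or.mp h with h' | h' <;> simp at h' <;> simp [h']

lemma pv_step_valid (xs : List Int) (p : PySem.Set Int) (st : Int × Int) (i : Int)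
    (h : pvValid p i) :
    pickA_step xs p st i = if st.1 < pvGap xs i then (pvGap xs i, i) else st := by
  unfold pickA_step pvGap
  rw [if_neg (by simp [h.1, h.2])]

lemma pv_scan_none_aux (xs : List Int) (p : PySem.Set Int) :
    ∀ (L : List Int) (st : Int × Int), (∀ j ∈ L, ¬ pvValid p j) →
    L.foldl (pickA_step xs p) st = st := by
  intro L
  induction L with
  | nil => intro st _; rfl
  | cons a L ih =>
    intro st h
    rw [List.foldl_cons, pv_step_invalid xs p st a (h a (by simp))]
    exact ih st (fun j hj => h j (by simp [hj]))

lemma pv_scan_post (xs : List Int) (p : PySem.Set Int) (g c : Int) :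
    ∀ (L : List Int), (∀ j ∈ L, pvValid p j → pvGap xs j ≤ g) →
    L.foldl (pickA_step xs p) (g, c) = (g, c) := by
  intro L
  induction L with
  | nil => intro _; rfl
  | cons a L ih =>
    intro h
    rw [List.foldl_cons]
    by_cases hv : pvValid p a
    · rw [pv_step_valid xs p _ a hv, if_neg (by simpa using h a (by simp) hv)]
      exact ih (fun j hj => h j (by simp [hj]))
    · rw [pv_step_invalid xs p _ a hv]
      exact ih (fun j hj => h j (by simp [hj]))

lemma pv_scan_pre (xs : List Int) (p : PySem.Set Int) (c : Int) :
    ∀ (L : List Int) (st : Int × Int), L.Pairwise (· < ·) → c ∈ L → pvValid p c →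
    st.1 < pvGap xs c →
    (∀ j ∈ L, pvValid p j → j = c ∨ pvGap xs j < pvGap xs c ∨ (pvGap xs j = pvGap xs c ∧ c < j)) →
    L.foldl (pickA_step xs p) st = (pvGap xs c, c) := by
  intro L
  induction L with
  | nil => intro st _ hc; exact absurd hc (by simp)
  | cons a L ih =>
    intro st hpw hc hv hst hmax
    rw [List.foldl_cons]
    rcases List.mem_cons.mp hc with hac | hcL
    · subst hac
      rw [pv_step_valid xs p st c hv, if_pos hst]
      apply pv_scan_post
      intro j hj hvj
      rcases hmax j (by simp [hj]) hvj with h | h | h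
      · subst h; exact le_refl _
      · exact le_of_lt h
      · exact le_of_eq h.1
    · have hac : a < c := (List.pairwise_cons.mp hpw).1 c hcL
      by_cases hva : pvValid p a
      · rw [pv_step_valid xs p st a hva]
        have hga : pvGap xs a < pvGap xs c := by
          rcases hmax a (by simp) hva with h | h | h
          · omega
          · exact h
          · omega
        have hst' : (if st.1 < pvGap xs a then (pvGap xs a, a) else st).1 < pvGap xs c := by
          split
          · simpa using hga
          · exact hst
        exact ih _ (List.pairwise_cons.mp hpw).2 hcL hv hst'
          (fun j hj => hmax j (by simp [hj]))
      · rw [pv_step_invalid xs p st a hva]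
        exact ih _ (List.pairwise_cons.mp hpw).2 hcL hv hst
          (fun j hj => hmax j (by simp [hj]))

lemma pv_pyRange_pairwise (a b : Int) : (PySem.List.pyRange a b 1).Pairwise (· < ·) := by
  by_cases h : a < b
  · have : ∀ (m : Nat) (a : Int), (b - a).toNat = m → (PySem.List.pyRange a b 1).Pairwise (· < ·) := by
      intro m
      induction m with
      | zero =>
        intro a ha
        rw [PySem.List.pyRange_one_eq_nil (by omega)]
        exact List.Pairwise.nil
      | succ m ih =>
        intro a ha
        by_cases hab : a < b
        · rw [PySem.List.pyRange_one_cons hab]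
          refine List.Pairwise.cons ?_ (ih (a + 1) (by omega))
          intro x hx
          have := PySem.List.mem_pyRange_one.mp hx
          omega
        · rw [PySem.List.pyRange_one_eq_nil (by omega)]
          exact List.Pairwise.nil
    exact this (b - a).toNat a rfl
  · rw [PySem.List.pyRange_one_eq_nil (by omega)]
    exact List.Pairwise.nil

lemma pv_scan_eq_none (xs : List Int) (p : PySem.Set Int)
    (h : ∀ j, 1 ≤ j → j < (xs.length : Int) → ¬ pvValid p j) :
    pickA_scan xs p = (-1, -1) := by
  unfold pickA_scan
  apply pv_scan_none_aux
  intro j hj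
  have := PySem.List.mem_pyRange_one.mp hj
  exact h j this.1 this.2

lemma pv_scan_eq (xs : List Int) (p : PySem.Set Int) (c : Int)
    (hc1 : 1 ≤ c) (hc2 : c < (xs.length : Int)) (hv : pvValid p c) (hg : 0 ≤ pvGap xs c)
    (hmax : ∀ j, 1 ≤ j → j < (xs.length : Int) → pvValid p j →
      j = c ∨ pvGap xs j < pvGap xs c ∨ (pvGap xs j = pvGap xs c ∧ c < j)) :
    pickA_scan xs p = (pvGap xs c, c) := by
  unfold pickA_scan
  apply pv_scan_pre xs p c _ _ (pv_pyRange_pairwise 1 _)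
    (PySem.List.mem_pyRange_one.mpr ⟨hc1, hc2⟩) hv (by simp; omega)
  intro j hj
  have := PySem.List.mem_pyRange_one.mp hj
  exact hmax j this.1 this.2

lemma pvA_loop_done (xs : List Int) (k : Int) (fuel : Nat) (p : PySem.Set Int)
    (h : k ≤ ((p : List Int).length : Int)) : pickA_loop xs k fuel p = p := by
  cases fuel <;> simp [pickA_loop, not_lt.mpr h]

lemma pvB_fold_done (k : Int) (order : List Int) (p : PySem.Set Int)
    (h : k ≤ ((p : List Int).length : Int)) : pickB_fold k order p = p := by
  induction order with
  | nil => rfl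
  | cons c rest ih =>
    have hs : pickB_step k p c = p := by unfold pickB_step; rw [if_pos h]
    show List.foldl (pickB_step k) (pickB_step k p c) rest = p
    rw [hs]; exact ih

lemma pv_length_add (p : PySem.Set Int) (c : Int) (h : c ∉ (p : List Int)) :
    ((p.add c : List Int)).length = (p : List Int).length + 1 := by
  unfold PySem.Set.add
  rw [if_neg (by simpa using h)]
  simp

-- main invariant: A's while-loop and B's single pass pick the same indices in the same order
lemma pv_main (xs : List Int) (k : Int) (hk : 0 < k) :
    ∀ (order : List Int) (p : PySem.Set Int) (fuel : Nat),
    order.Pairwise (pvKeyRel xs) →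
    (∀ i ∈ order, 2 ≤ i ∧ i < (xs.length : Int) - 1) →
    (∀ i, 1 ≤ i → i < (xs.length : Int) → pvValid p i → i ∈ order) →
    (∀ i ∈ order, 0 ≤ pvGap xs i) →
    k.toNat ≤ (p : List Int).length + fuel →
    pickA_loop xs k fuel p = pickB_fold k order p := by
  intro order
  induction order with
  | nil =>
    intro p fuel _ _ hcomp _ hfuel
    by_cases hd : k ≤ ((p : List Int).length : Int)
    · rw [pvA_loop_done xs k fuel p hd]; rfl
    · push_neg at hd
      obtain ⟨f, rfl⟩ : ∃ f, fuel = f + 1 := ⟨fuel - 1, by omega⟩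
      show pickA_loop xs k (f + 1) p = p
      unfold pickA_loop
      rw [if_pos hd, pv_scan_eq_none xs p (fun j hj1 hj2 hv => by simpa using hcomp j hj1 hj2 hv)]
      simp
  | cons c rest ih =>
    intro p fuel hpw hbnd hcomp hgap hfuel
    by_cases hd : k ≤ ((p : List Int).length : Int)
    · rw [pvA_loop_done xs k fuel p hd, pvB_fold_done k _ p hd]
    · push_neg at hd
      by_cases hv : pvValid p c
      · -- A picks exactly c next; B adds c
        obtain ⟨f, rfl⟩ : ∃ f, fuel = f + 1 := ⟨fuel - 1, by omega⟩
        have hb := hbnd c (by simp)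
        have hscan : pickA_scan xs p = (pvGap xs c, c) := by
          apply pv_scan_eq xs p c (by omega) (by omega) hv (hgap c (by simp))
          intro j hj1 hj2 hvj
          rcases List.mem_cons.mp (hcomp j hj1 hj2 hvj) with h | h
          · exact Or.inl h
          · rcases (List.pairwise_cons.mp hpw).1 j h with h' | h'
            · exact Or.inr (Or.inl h')
            · exact Or.inr (Or.inr ⟨h'.1.symm, h'.2⟩)
        have hstepB : pickB_step k p c = p.add c := by
          unfold pickB_step
          rw [if_neg (by omega), if_pos (by simp [hv.1, hv.2])]
        show pickA_loop xs k (f + 1) p = pickB_fold k (c :: rest) p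
        unfold pickA_loop
        rw [if_pos hd, hscan]
        simp only
        rw [if_neg (by omega)]
        show pickA_loop xs k f (p.add c) = pickB_fold k (c :: rest) p
        have hB : pickB_fold k (c :: rest) p = pickB_fold k rest (p.add c) := by
          show (List.foldl _ (pickB_step k p c) rest : PySem.Set Int) = _
          rw [hstepB]; rfl
        rw [hB]
        apply ih (p.add c) f (List.pairwise_cons.mp hpw).2
          (fun i hi => hbnd i (by simp [hi]))
        · intro i hi1 hi2 hvi
          have hmem := PySem.Set.mem_add p c
          have hvi' : pvValid p i := by
            constructor
            · intro hmemi; exact hvi.1 ((hmem i).mpr (Or.inl hmemi))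
            · intro hmemi; exact hvi.2 ((hmem (i - 1)).mpr (Or.inl hmemi))
          have hic : i ≠ c := by
            intro h; subst h
            exact hvi.1 ((hmem i).mpr (Or.inr rfl))
          rcases List.mem_cons.mp (hcomp i hi1 hi2 hvi') with h | h
          · exact absurd h hic
          · exact h
        · exact fun i hi => hgap i (by simp [hi])
        · rw [pv_length_add p c hv.1]; omega
      · -- c already invalid for both
        have hstepB : pickB_step k p c = p := by
          unfold pickB_step
          rw [if_neg (by omega), if_neg]
          rcases not_and_or.mp hv with h | h <;> simp at h <;> simp [h]
        have hB : pickB_fold k (c :: rest) p = pickB_fold k rest p := by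
          show (List.foldl _ (pickB_step k p c) rest : PySem.Set Int) = _
          rw [hstepB]; rfl
        rw [hB]
        apply ih p fuel (List.pairwise_cons.mp hpw).2
          (fun i hi => hbnd i (by simp [hi]))
        · intro i hi1 hi2 hvi
          rcases List.mem_cons.mp (hcomp i hi1 hi2 hvi) with h | h
          · subst h; exact absurd hvi hv
          · exact h
        · exact fun i hi => hgap i (by simp [hi])
        · exact hfuel

-- ===== VERDICT (by name: the statement is the Claim_ definition above) =====
theorem pick_most_spread_py_spec : Claim_equal_pick_most_spread_py := by
  intro idx_list k _
  unfold Spec_pick_most_spread_py pick_most_spread_py pick_most_spread_py_alt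
  by_cases h1 : k ≤ 0
  · simp [h1]
  by_cases h2 : (idx_list.length : Int) ≤ k
  · simp [h1, h2]
  rw [if_neg h1, if_neg h1, if_neg h2, if_neg h2]
  simp only
  push_neg at h1 h2
  set xs := PySem.List.sorted idx_list (fun x => x) with hxs
  have hlen : xs.length = idx_list.length :=
    (PySem.List.sorted_perm idx_list (fun x => x) false).length_eq
  set N : Int := (idx_list.length : Int) with hN
  have hN2 : 2 ≤ N := by omega
  set key : Int → Lex (Int × Int) :=
    (fun i => toLex (PySem.List.pyGetD xs (i - 1) 0 - PySem.List.pyGetD xs i 0, i)) with hkey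
  set order := PySem.List.sorted (PySem.List.pyRange 2 (N - 1) 1) key with horder
  have hoperm : order.Perm (PySem.List.pyRange 2 (N - 1) 1) :=
    PySem.List.sorted_perm _ key false
  have homem : ∀ i, i ∈ order ↔ (2 ≤ i ∧ i < N - 1) := by
    intro i
    rw [hoperm.mem_iff, PySem.List.mem_pyRange_one]
  have hond : order.Nodup := hoperm.nodup_iff.mpr (pv_pyRange_pairwise 2 (N - 1)).nodup
  have hokey : order.Pairwise (fun a b => key a ≤ key b) := PySem.List.sorted_pairwise _ key
  have hopw : order.Pairwise (pvKeyRel xs) := by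
    refine (hokey.and hond).imp ?_
    rintro a b ⟨hle, hne⟩
    rw [Prod.Lex.le_iff] at hle
    simp only [hkey, ofLex_toLex] at hle
    unfold pvKeyRel pvGap
    rcases hle with h | h
    · left; omega
    · rcases lt_or_eq_of_le h.2 with h' | h'
      · right; constructor <;> omega
      · exact absurd h' hne
  have hp0 : (PySem.Set.ofList [0, N - 1] : List Int) = [0, N - 1] := by
    show PySem.Set.add (PySem.Set.add (PySem.Set.empty) 0) (N - 1) = _
    rw [show PySem.Set.add (PySem.Set.empty) (0 : Int) = [0] from rfl]
    unfold PySem.Set.add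
    rw [if_neg (by simp; omega)]
    rfl
  have hsorted : xs.Pairwise (· ≤ ·) := by
    have := PySem.List.sorted_pairwise idx_list (fun x => x)
    simpa using this
  have hgap : ∀ i ∈ order, 0 ≤ pvGap xs i := by
    intro i hi
    have hb := (homem i).mp hi
    have hlt : (i : Int) < (xs.length : Int) := by omega
    unfold pvGap
    rw [PySem.List.pyGetD_eq_getElem xs 0 (by omega) hlt,
        PySem.List.pyGetD_eq_getElem xs 0 (by omega) (by omega)]
    have := List.pairwise_iff_getElem.mp hsorted (i - 1).toNat i.toNat
      (by omega) (by omega) (by omega)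
    omega
  have hmain := pv_main xs k h1 order (PySem.Set.ofList [0, N - 1]) k.natAbs hopw
    (fun i hi => by have := (homem i).mp hi; omega)
    (by
      intro i hi1 hi2 hvi
      rw [hp0] at hvi
      obtain ⟨hv1, hv2⟩ := hvi
      simp at hv1 hv2
      rw [homem]
      omega)
    hgap
    (by rw [hp0]; simp only [List.length_cons, List.length_nil]; omega)
  rw [show ((xs.length : Int)) = N from by rw [hlen, hN], hmain]
-- note: A builds the start set from xs.length, B from idx_list.length; equal by hlen
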